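-- pv_equiv track=rewrite | github.com/Nononananee/Novr | memory/emotional_memory_system.py | _emotions_conflict
-- ===== SOURCE A (Python) =====
-- def _emotions_conflict(emotion1: str, emotion2: str) -> bool:
--     """Check if two emotions are conflicting."""
--
--     conflicting_pairs = [
--         ("joy", "sadness"),
--         ("trust", "disgust"),
--         ("fear", "anger"),
--         ("surprise", "anticipation")
--     ]
--
--     for pair in conflicting_pairs:
--         if (emotion1 in pair and emotion2 in pair) and emotion1 != emotion2:
--             return True
--
--     return False
-- ===== SOURCE B (Python) =====
-- # Plutchik wheel order: opposites occupy the same index-pair slot (i//2).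
-- _WHEEL = ("joy", "sadness", "trust", "disgust", "fear", "anger", "surprise", "anticipation")
--
--
-- def _emotions_conflict(emotion1: str, emotion2: str) -> bool:
--     """Check if two emotions are conflicting."""
--     if emotion1 not in _WHEEL or emotion2 not in _WHEEL:
--         return False
--     i = _WHEEL.index(emotion1)
--     j = _WHEEL.index(emotion2)
--     return i != j and i // 2 == j // 2
-- ===== Notes on version B (the rewrite author's own statement) =====
-- stated objective: alternative
-- what changed: Replaces the scan over pair tuples with membership tests by rank arithmetic: both emotions are located in one flat wheel ordering and they conflict iff their ranks differ but share the same slot i//2.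
import Mathlib
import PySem

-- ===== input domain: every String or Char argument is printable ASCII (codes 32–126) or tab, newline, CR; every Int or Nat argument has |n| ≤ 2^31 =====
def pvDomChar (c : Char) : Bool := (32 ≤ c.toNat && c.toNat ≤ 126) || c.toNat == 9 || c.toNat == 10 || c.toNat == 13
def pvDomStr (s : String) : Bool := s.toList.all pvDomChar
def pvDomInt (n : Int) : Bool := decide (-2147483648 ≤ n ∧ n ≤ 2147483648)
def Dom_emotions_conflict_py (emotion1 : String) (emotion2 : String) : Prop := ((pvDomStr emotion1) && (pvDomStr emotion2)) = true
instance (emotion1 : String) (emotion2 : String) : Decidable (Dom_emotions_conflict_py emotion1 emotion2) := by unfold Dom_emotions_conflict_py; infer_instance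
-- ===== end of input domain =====

-- B replaces A's scan over conflicting pair tuples by rank arithmetic on one flat wheel ordering (conflict iff ranks differ but share the slot i//2); alternative decomposition, same results.


-- ===== PORT A =====
-- loop over conflicting_pairs with early return, as in A
def pvLoopA (pairs : List (String × String)) (emotion1 emotion2 : String) : Bool :=
  match pairs with
  | [] => false
  | pair :: rest =>
    if ((emotion1 == pair.1 || emotion1 == pair.2) && (emotion2 == pair.1 || emotion2 == pair.2))
        && emotion1 != emotion2 then true
    else pvLoopA rest emotion1 emotion2

def emotions_conflict_py (emotion1 : String) (emotion2 : String) : Bool :=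
  pvLoopA [("joy", "sadness"), ("trust", "disgust"), ("fear", "anger"), ("surprise", "anticipation")]
    emotion1 emotion2

-- ===== PORT B =====
-- B: flat wheel ordering; ranks conflict iff they differ but share the slot i//2
def pvWheel : List String :=
  ["joy", "sadness", "trust", "disgust", "fear", "anger", "surprise", "anticipation"]

def emotions_conflict_py_alt (emotion1 : String) (emotion2 : String) : Bool :=
  if !(pvWheel.contains emotion1) || !(pvWheel.contains emotion2) then false
  else
    match PySem.List.index? pvWheel emotion1, PySem.List.index? pvWheel emotion2 with
    | some i, some j => i != j && (i / 2 == j / 2)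
    | _, _ => false

-- ===== PRECONDITION & SPEC =====
def Spec_emotions_conflict_py (emotion1 : String) (emotion2 : String) (out : Bool) : Prop := out = emotions_conflict_py_alt emotion1 emotion2
instance (emotion1 : String) (emotion2 : String) (out : Bool) : Decidable (Spec_emotions_conflict_py emotion1 emotion2 out) := by unfold Spec_emotions_conflict_py; infer_instance

-- ===== CLAIM =====
def Claim_equal_emotions_conflict_py : Prop := ∀ (emotion1 : String) (emotion2 : String), Dom_emotions_conflict_py emotion1 emotion2 → Spec_emotions_conflict_py emotion1 emotion2 (emotions_conflict_py emotion1 emotion2)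

-- ===== LEMMAS AND PROOFS =====

-- ===== VERDICT =====
set_option maxHeartbeats 2000000 in
set_option maxRecDepth 8192 in
theorem emotions_conflict_py_spec : Claim_equal_emotions_conflict_py := by
  intro e1 e2 _
  unfold Spec_emotions_conflict_py emotions_conflict_py emotions_conflict_py_alt pvWheel
  simp only [pvLoopA, List.contains_eq_mem, List.mem_cons, List.not_mem_nil]
  by_cases h1 : e1 = "joy" <;> by_cases h2 : e1 = "sadness" <;> by_cases h3 : e1 = "trust" <;>
    by_cases h4 : e1 = "disgust" <;> by_cases h5 : e1 = "fear" <;> by_cases h6 : e1 = "anger" <;>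
    by_cases h7 : e1 = "surprise" <;> by_cases h8 : e1 = "anticipation" <;>
    (try simp_all) <;>
    (by_cases k1 : e2 = "joy" <;> by_cases k2 : e2 = "sadness" <;> by_cases k3 : e2 = "trust" <;>
      by_cases k4 : e2 = "disgust" <;> by_cases k5 : e2 = "fear" <;> by_cases k6 : e2 = "anger" <;>
      by_cases k7 : e2 = "surprise" <;> by_cases k8 : e2 = "anticipation" <;>
      (try simp_all) <;> decide)
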